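-- pv_equiv track=rewrite | github.com/Dhanush-22/TollPlazaManagement | one.py | removeSpecialCharacter
-- ===== SOURCE A (Python) =====
-- def removeSpecialCharacter(s):
--     j = 0
--     while j < len(s):
--         if (ord(s[j]) in range(97,123) ):
--             # erase function to erase
--             # the character
--             x=chr(ord(s[j])-32)
--             y= s[0:j]+x+s[j+1:]
--             s=y
--             j -= 1
--         j += 1
--     i=0
--     while i < len(s):
--         if not (ord(s[i]) in range(48,58) or ord(s[i]) in range(65,91) or  ord(s[i]) in range(97,123)):
--             # erase function to erase
--             # the character
--             x= s[0:i]+s[i+1:]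
--             s=x
--             i -= 1
--         i += 1
--     return "".join(s)
-- ===== SOURCE B (Python) =====
-- def removeSpecialCharacter(s):
--     return ''.join(c for c in s if c.isalnum()).upper()
-- ===== Notes on version B (the rewrite author's own statement) =====
-- stated objective: faster
-- what changed: Replaces A's two index-mutating while-loops that rebuild the string by slice splicing at every change by a single filter comprehension followed by str.upper().
import Mathlib
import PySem

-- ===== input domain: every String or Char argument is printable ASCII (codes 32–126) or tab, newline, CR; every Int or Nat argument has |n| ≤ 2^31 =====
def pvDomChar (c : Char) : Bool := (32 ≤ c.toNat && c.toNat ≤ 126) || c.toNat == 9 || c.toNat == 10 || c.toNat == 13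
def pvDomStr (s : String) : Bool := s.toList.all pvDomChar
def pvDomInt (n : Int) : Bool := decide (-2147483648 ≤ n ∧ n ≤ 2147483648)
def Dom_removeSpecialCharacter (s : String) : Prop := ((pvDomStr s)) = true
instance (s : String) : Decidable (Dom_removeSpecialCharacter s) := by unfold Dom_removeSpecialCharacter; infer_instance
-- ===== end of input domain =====

-- B replaces A's two index-mutating while-loops (slice splicing, ord-range tests) by one
-- filter comprehension followed by str.upper(); objective: idiomatic, same result.

-- ===== PORT A =====
-- the lowercase-letter test 'ord(s[j]) in range(97,123)'
def rscIsLow (c : Char) : Bool := decide (97 ≤ c.toNat ∧ c.toNat ≤ 122)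

-- needed by rscLoop1's termination: chr(ord-32) of a lowercase char is not lowercase
theorem rscUp_not_low (c : Char) (h : 97 ≤ c.toNat ∧ c.toNat ≤ 122) :
    rscIsLow (Char.ofNat (c.toNat - 32)) = false := by
  have hv : (c.toNat - 32).isValidChar := Or.inl (by omega)
  simp [rscIsLow, Char.toNat_ofNat, hv]
  omega

-- first while-loop: uppercase each lowercase char in place (j -= 1 then j += 1 re-checks the same index)
def rscLoop1 (s : List Char) (j : Nat) : List Char :=
  if h : j < s.length then
    if rscIsLow s[j] then
      rscLoop1 (s.take j ++ [Char.ofNat (s[j].toNat - 32)] ++ s.drop (j+1)) j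
    else rscLoop1 s (j+1)
  else s
termination_by (s.length - j) + (s.filter rscIsLow).length
decreasing_by
  · have hlow : rscIsLow s[j] = true := by assumption
    have hsplit : s.take j ++ s[j] :: s.drop (j+1) = s := by
      rw [List.getElem_cons_drop, List.take_append_drop]
    have hc : (97 ≤ s[j].toNat ∧ s[j].toNat ≤ 122) := by
      simpa [rscIsLow] using hlow
    have hnot := rscUp_not_low s[j] hc
    have hlen : (s.take j ++ [Char.ofNat (s[j].toNat - 32)] ++ s.drop (j+1)).length = s.length := by
      simp [List.length_append, List.length_take, List.length_drop]; omega
    have hold : (s.filter rscIsLow).length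
        = (List.filter rscIsLow (s.take j)).length + 1 + (List.filter rscIsLow (s.drop (j+1))).length := by
      conv_lhs => rw [← hsplit]
      rw [List.filter_append, List.filter_cons]
      simp [hlow]
      omega
    have hnew : ((s.take j ++ [Char.ofNat (s[j].toNat - 32)] ++ s.drop (j+1)).filter rscIsLow).length
        = (List.filter rscIsLow (s.take j)).length + (List.filter rscIsLow (s.drop (j+1))).length := by
      rw [List.filter_append, List.filter_append]
      simp [hnot]
    omega
  · omega

-- the alphanumeric test of the second loop
def rscIsAln (c : Char) : Bool :=
  decide ((48 ≤ c.toNat ∧ c.toNat ≤ 57) ∨ (65 ≤ c.toNat ∧ c.toNat ≤ 90) ∨ (97 ≤ c.toNat ∧ c.toNat ≤ 122))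

-- second while-loop: delete every non-alphanumeric char (i -= 1 then i += 1 re-checks the same index)
def rscLoop2 (s : List Char) (i : Nat) : List Char :=
  if h : i < s.length then
    if ¬ rscIsAln s[i] then
      rscLoop2 (s.take i ++ s.drop (i+1)) i
    else rscLoop2 s (i+1)
  else s
termination_by s.length - i
decreasing_by
  · simp [List.length_append, List.length_take, List.length_drop]; omega
  · omega

def removeSpecialCharacter (s : String) : String :=
  String.ofList (rscLoop2 (rscLoop1 s.toList 0) 0)

-- ===== PORT B =====
def removeSpecialCharacter_alt (s : String) : String :=
  PySem.Str.upper (String.ofList (s.toList.filter PySem.Chars.isalnum))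

-- ===== PRECONDITION & SPEC =====
def Spec_removeSpecialCharacter (s : String) (out : String) : Prop := out = removeSpecialCharacter_alt s
instance (s : String) (out : String) : Decidable (Spec_removeSpecialCharacter s out) := by unfold Spec_removeSpecialCharacter; infer_instance

-- ===== CLAIM (what is proved, stated in full; the proofs are below) =====
def Claim_equal_removeSpecialCharacter : Prop := ∀ (s : String), Dom_removeSpecialCharacter s → Spec_removeSpecialCharacter s (removeSpecialCharacter s)

-- ===== LEMMAS AND PROOFS =====

theorem charLe_iff (a c : Char) : a ≤ c ↔ a.toNat ≤ c.toNat := by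
  rw [Char.le_def, UInt32.le_iff_toNat_le]; exact Iff.rfl

theorem rscIsLow_iff (c : Char) : rscIsLow c = PySem.Chars.islower c := by
  simp only [rscIsLow, PySem.Chars.islower, charLe_iff, Bool.decide_and]
  rfl

theorem rscUpperChar_eq (c : Char) (h : rscIsLow c = true) :
    Char.ofNat (c.toNat - 32) = PySem.Chars.upperChar c := by
  rw [rscIsLow_iff] at h
  simp [PySem.Chars.upperChar, h]

theorem upperChar_id (c : Char) (h : rscIsLow c = false) : PySem.Chars.upperChar c = c := by
  rw [rscIsLow_iff] at h
  simp [PySem.Chars.upperChar, h]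

theorem rscLoop1_eq (s : List Char) (j : Nat) :
    rscLoop1 s j = s.take j ++ (s.drop j).map PySem.Chars.upperChar := by
  induction s, j using rscLoop1.induct with
  | case1 s j h hlow ih =>
    rw [rscLoop1]; simp only [h, dif_pos, hlow, if_pos]
    rw [ih]
    have hc : (97 ≤ s[j].toNat ∧ s[j].toNat ≤ 122) := by simpa [rscIsLow] using hlow
    have hnot := rscUp_not_low s[j] hc
    have hjlen : (s.take j).length = j := by simp [List.length_take]; omega
    rw [List.append_assoc, List.take_left' hjlen, List.drop_left' hjlen]
    have hdrop : s.drop j = s[j] :: s.drop (j+1) := (List.getElem_cons_drop h).symm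
    rw [hdrop]
    simp only [List.singleton_append, List.map_cons]
    rw [upperChar_id _ hnot, ← rscUpperChar_eq _ hlow]
  | case2 s j h hlow ih =>
    rw [rscLoop1]; simp only [h, dif_pos]
    rw [if_neg (by simpa using hlow), ih]
    have hdrop : s.drop j = s[j] :: s.drop (j+1) := (List.getElem_cons_drop h).symm
    have htake : s.take (j+1) = s.take j ++ [s[j]] := by
      rw [List.take_add_one]; simp [List.getElem?_eq_getElem h]
    rw [htake, hdrop, List.append_assoc]
    simp only [List.singleton_append, List.map_cons]
    rw [upperChar_id _ (by simpa using hlow)]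
  | case3 s j h =>
    rw [rscLoop1]
    have hj : s.length ≤ j := by omega
    simp [h, List.take_of_length_le hj, List.drop_of_length_le hj]

theorem rscIsAln_iff (c : Char) : rscIsAln c = PySem.Chars.isalnum c := by
  rw [Bool.eq_iff_iff]
  simp only [rscIsAln, PySem.Chars.isalnum, PySem.Chars.isalpha, PySem.Chars.isdigit,
    PySem.Chars.isupper, PySem.Chars.islower, Bool.or_eq_true, Bool.and_eq_true,
    decide_eq_true_eq, charLe_iff]
  have h0 : ('0':Char).toNat = 48 := rfl
  have h9 : ('9':Char).toNat = 57 := rfl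
  have hA : ('A':Char).toNat = 65 := rfl
  have hZ : ('Z':Char).toNat = 90 := rfl
  have ha : ('a':Char).toNat = 97 := rfl
  have hz : ('z':Char).toNat = 122 := rfl
  rw [h0, h9, hA, hZ, ha, hz]
  omega

theorem rscLoop2_eq (s : List Char) (i : Nat) :
    rscLoop2 s i = s.take i ++ (s.drop i).filter rscIsAln := by
  induction s, i using rscLoop2.induct with
  | case1 s i h hbad ih =>
    rw [rscLoop2]; simp only [h, dif_pos, hbad]
    rw [ih]
    have hjlen : (s.take i).length = i := by simp [List.length_take]; omega
    rw [List.take_left' hjlen, List.drop_left' hjlen]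
    have hdrop : s.drop i = s[i] :: s.drop (i+1) := (List.getElem_cons_drop h).symm
    rw [hdrop, List.filter_cons]
    simp_all
  | case2 s i h hbad ih =>
    rw [rscLoop2]; simp only [h, dif_pos]
    rw [if_neg hbad, ih]
    have hgood : rscIsAln s[i] = true := by simpa using hbad
    have hdrop : s.drop i = s[i] :: s.drop (i+1) := (List.getElem_cons_drop h).symm
    have htake : s.take (i+1) = s.take i ++ [s[i]] := by
      rw [List.take_add_one]; simp [List.getElem?_eq_getElem h]
    rw [htake, hdrop, List.filter_cons]
    simp only [hgood, if_pos]
    rw [List.append_assoc, List.singleton_append]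
  | case3 s i h =>
    rw [rscLoop2]
    have hi : s.length ≤ i := by omega
    simp [h, List.take_of_length_le hi, List.drop_of_length_le hi]

theorem aln_upperChar (c : Char) : rscIsAln (PySem.Chars.upperChar c) = rscIsAln c := by
  by_cases hl : rscIsLow c = true
  · have hc : (97 ≤ c.toNat ∧ c.toNat ≤ 122) := by simpa [rscIsLow] using hl
    have hv : (c.toNat - 32).isValidChar := Or.inl (by omega)
    have hvn : (Char.ofNat (c.toNat - 32)).toNat = c.toNat - 32 := by
      rw [Char.toNat_ofNat, if_pos hv]
    rw [← rscUpperChar_eq c hl, Bool.eq_iff_iff]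
    simp only [rscIsAln, decide_eq_true_eq, hvn]
    omega
  · rw [upperChar_id c (by simpa using hl)]

theorem filter_map_comm (l : List Char) :
    (l.map PySem.Chars.upperChar).filter rscIsAln
      = (l.filter rscIsAln).map PySem.Chars.upperChar := by
  induction l with
  | nil => rfl
  | cons c t ih =>
    simp only [List.map_cons, List.filter_cons, aln_upperChar]
    by_cases h : rscIsAln c = true <;> simp [h, ih]

-- ===== VERDICT (by name: the statement is the Claim_ definition above) =====
theorem removeSpecialCharacter_spec : Claim_equal_removeSpecialCharacter := by
  intro s _
  unfold Spec_removeSpecialCharacter removeSpecialCharacter removeSpecialCharacter_alt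
  apply String.toList_injective
  rw [PySem.Str.toList_upper, String.toList_ofList, String.toList_ofList]
  rw [rscLoop1_eq, rscLoop2_eq]
  simp only [List.take_zero, List.drop_zero, List.nil_append]
  rw [filter_map_comm, List.filter_congr (fun c _ => rscIsAln_iff c)]
  rfl
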